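-- pv_equiv track=rewrite | github.com/dmanh204/rc4 | TestRC4.py | byte2bin
-- ===== SOURCE A (Python) =====
-- def byte2bin(int):
--     string = ""
--     for i in range(8):
--         x = 0b00000001 << (7-i)
--         x = x & int
--         x = x >> (7-i)
--         string += str(x)
--
--     return string
-- ===== SOURCE B (Python) =====
-- def byte2bin(int):
--     n = int
--     s = ""
--     for _ in range(8):
--         s = str(n % 2) + s
--         n //= 2
--     return s
-- ===== Notes on version B (the rewrite author's own statement) =====
-- stated objective: simpler
-- what changed: Instead of extracting each bit by masking a shifted constant and shifting back, B peels the least-significant bit off a shrinking accumulator (n % 2, n //= 2) and prepends it, which also reproduces the two's-complement digits on negatives via Python's floored division.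
import Mathlib
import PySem

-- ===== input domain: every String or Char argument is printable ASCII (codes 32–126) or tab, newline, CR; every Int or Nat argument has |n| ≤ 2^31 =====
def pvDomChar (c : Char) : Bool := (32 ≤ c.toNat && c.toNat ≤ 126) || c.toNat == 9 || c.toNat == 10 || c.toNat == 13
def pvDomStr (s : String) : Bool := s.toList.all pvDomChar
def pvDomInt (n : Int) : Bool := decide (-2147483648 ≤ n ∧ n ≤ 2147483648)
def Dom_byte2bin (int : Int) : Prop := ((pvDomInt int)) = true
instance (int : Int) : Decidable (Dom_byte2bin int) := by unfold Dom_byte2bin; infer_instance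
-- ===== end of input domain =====

-- B peels the least-significant bit off a shrinking accumulator (n % 2, n //= 2) and prepends,
-- instead of A's per-position mask-and-shift extraction; same value on every Int (two's complement
-- digits on negatives come from Python's floored division).

-- ===== PORT A =====
-- Python's `<<`/`>>`/`&` on ints are Lean's `<<<`/`>>>`/`PySem.Int.band`; the shift amount 7-i is
-- a nonnegative literal for every i in range(8), so `.toNat` is exact here.
def byte2bin (int : Int) : String :=
  (PySem.List.pyRange 0 8 1).foldl (fun string i =>
    let x : Int := 1 <<< (7 - i).toNat
    let x := PySem.Int.band x int
    let x := x >>> (7 - i).toNat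
    string ++ PySem.Int.toStr x) ""

-- ===== PORT B =====
def byte2bin_alt (int : Int) : String :=
  ((PySem.List.pyRange 0 8 1).foldl (fun (p : String × Int) _ =>
    (PySem.Int.toStr (PySem.Int.mod p.2 2) ++ p.1, PySem.Int.floordiv p.2 2)) ("", int)).1

-- ===== PRECONDITION & SPEC =====
def Spec_byte2bin (int : Int) (out : String) : Prop := out = byte2bin_alt int
instance (int : Int) (out : String) : Decidable (Spec_byte2bin int out) := by unfold Spec_byte2bin; infer_instance

-- ===== CLAIM (what is proved, stated in full; the proofs are below) =====
def Claim_equal_byte2bin : Prop := ∀ (int : Int), Dom_byte2bin int → Spec_byte2bin int (byte2bin int)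

-- ===== LEMMAS AND PROOFS =====

lemma one_shl (k : Nat) : ((1:Int) <<< k) = ((2^k : Nat) : Int) := by
  rw [← Nat.one_shiftLeft, Int.natCast_shiftLeft]; norm_num

lemma testbit_char (m k : Nat) : (m.testBit k).toNat = m / 2^k % 2 := by
  rw [Nat.testBit_eq_decide_div_mod_eq]
  rcases Nat.mod_two_eq_zero_or_one (m / 2^k) with h | h <;> simp [h]

lemma band_neg (k : Nat) (n : Int) (h : n < 0) :
    PySem.Int.band ((1:Int) <<< k) n = ↑(2^k - (2^k &&& (-n-1).toNat)) := by
  rw [one_shl]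
  simp only [PySem.Int.band]
  rw [if_pos (by positivity : (0:Int) ≤ ((2^k : Nat) : Int)), if_neg (not_le.2 h),
      Int.toNat_natCast]

-- the k-th two's-complement bit, as A extracts it, equals (n / 2^k) % 2 (euclidean, divisor > 0)
lemma digA (k : Nat) (n : Int) :
    PySem.Int.band ((1:Int) <<< k) n >>> k = n / ((2^k : Nat) : Int) % 2 := by
  have hP : (0:Nat) < 2^k := pow_pos (by norm_num) k
  rcases (by omega : 0 ≤ n ∨ n < 0) with h | h
  · obtain ⟨m, rfl⟩ := Int.eq_ofNat_of_zero_le h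
    rw [one_shl, PySem.Int.band_natCast, Nat.and_comm, Nat.and_two_pow,
        ← Int.natCast_shiftRight, Nat.shiftRight_eq_div_pow,
        Nat.mul_div_cancel _ hP]
    exact_mod_cast testbit_char m k
  · obtain ⟨m, hn⟩ : ∃ m : Nat, n = -↑m - 1 :=
      ⟨(-n-1).toNat, by omega⟩
    have hmm : (-n-1).toNat = m := by omega
    rw [band_neg k n h, hmm, Nat.and_comm, Nat.and_two_pow,
        ← Int.natCast_shiftRight, Nat.shiftRight_eq_div_pow]
    have ht1 : (m.testBit k).toNat ≤ 1 := Bool.toNat_le _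
    have ht := testbit_char m k
    set t := (m.testBit k).toNat with htt
    have hdiv : (2^k - t * 2^k) / 2^k = 1 - t := by
      interval_cases t
      · simp [Nat.div_self hP]
      · simp
    rw [hdiv]
    set q := m / 2^k with hq
    set r := m % 2^k with hr
    have hdm : 2^k * q + r = m := Nat.div_add_mod m (2^k)
    have hrlt : r < 2^k := Nat.mod_lt _ hP
    have hed : n / ((2^k : Nat) : Int) = -↑q - 1 := by
      have huniq := (Int.ediv_emod_unique
        (a := n) (b := ((2^k : Nat) : Int)) (r := ((2^k - 1 - r : Nat) : Int)) (q := -↑q - 1)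
        (by exact_mod_cast hP))
      refine (huniq.mpr ⟨?_, by positivity, by exact_mod_cast (by omega : 2^k - 1 - r < 2^k)⟩).1
      have hdm' : ((2^k : Nat) : Int) * ↑q + ↑r = ↑m := by exact_mod_cast hdm
      have hr' : ((2^k - 1 - r : Nat) : Int) = ((2^k : Nat) : Int) - 1 - ↑r := by
        push_cast [Nat.cast_sub (by omega : r ≤ 2^k - 1), Nat.cast_sub (by omega : 1 ≤ 2^k)]
        ring
      rw [hr', hn]
      linear_combination -hdm'
    rw [hed]
    omega

-- digit-by-digit form of A after unfolding its loop
lemma digA' (k : Nat) (n : Int) :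
    PySem.Int.toStr (PySem.Int.band (((1 <<< k : Nat) : Int)) n >>> ((k : Nat) : Int))
      = PySem.Int.toStr (n / ((2^k : Nat) : Int) % 2) := by
  rw [Int.shiftRight_natCast_right,
      show ((1 <<< k : Nat) : Int) = (1:Int) <<< k from by rw [Int.natCast_shiftLeft]; norm_num,
      digA]

lemma fd2 (a : Int) : PySem.Int.floordiv a 2 = a / 2 :=
  PySem.Int.floordiv_eq_ediv_of_pos (by norm_num)

lemma md2 (a : Int) : PySem.Int.mod a 2 = a % 2 :=
  PySem.Int.mod_eq_emod_of_pos (by norm_num)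

-- ===== VERDICT (by name: the statement is the Claim_ definition above) =====
theorem byte2bin_spec : Claim_equal_byte2bin := by
  intro n _
  unfold Spec_byte2bin byte2bin byte2bin_alt
  rw [show PySem.List.pyRange 0 8 1 = [0,1,2,3,4,5,6,7] from by decide]
  simp only [List.foldl, fd2, md2]
  rw [show ((7:Int) - 0).toNat = 7 from by decide, show ((7:Int) - 1).toNat = 6 from by decide,
      show ((7:Int) - 2).toNat = 5 from by decide, show ((7:Int) - 3).toNat = 4 from by decide,
      show ((7:Int) - 4).toNat = 3 from by decide, show ((7:Int) - 5).toNat = 2 from by decide,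
      show ((7:Int) - 6).toNat = 1 from by decide, show ((7:Int) - 7).toNat = 0 from by decide]
  rw [digA' 7 n, digA' 6 n, digA' 5 n, digA' 4 n, digA' 3 n, digA' 2 n, digA' 1 n, digA' 0 n]
  rw [show (((2:Nat)^7 : Nat) : Int) = 128 from by norm_num,
      show (((2:Nat)^6 : Nat) : Int) = 64 from by norm_num,
      show (((2:Nat)^5 : Nat) : Int) = 32 from by norm_num,
      show (((2:Nat)^4 : Nat) : Int) = 16 from by norm_num,
      show (((2:Nat)^3 : Nat) : Int) = 8 from by norm_num,
      show (((2:Nat)^2 : Nat) : Int) = 4 from by norm_num,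
      show (((2:Nat)^1 : Nat) : Int) = 2 from by norm_num,
      show (((2:Nat)^0 : Nat) : Int) = 1 from by norm_num,
      Int.ediv_one,
      show n / 2 / 2 = n / 4 from by omega,
      show n / 4 / 2 = n / 8 from by omega,
      show n / 8 / 2 = n / 16 from by omega,
      show n / 16 / 2 = n / 32 from by omega,
      show n / 32 / 2 = n / 64 from by omega,
      show n / 64 / 2 = n / 128 from by omega]
  simp only [String.append_assoc, String.append_empty, String.empty_append]
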